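-- pv_equiv track=rewrite | github.com/matt-mulligan/pypoker | src/pypoker/engine/hand_solver/functions/outs.py | _outs_tb_straight
-- ===== SOURCE A (Python) =====
-- from typing import List, Dict, Union
--
-- def _outs_tb_straight(tiebreakers: Dict) -> str:
--     """
--     Private method to determine which player would have the stronger straight hand. given the drawn cards.
--
--     :param tiebreakers: dictionary of each players tiebreak information for this draw.
--     :param hole_cards: dictionary of each players hole cards
--     :param board_cards: List of the board cards that have been dealt
--     :param drawn_cards: List of cards that would be drawn in this scenario
--
--     :return: Name of the winning player. if a tie occurs, then return a TIE(<PLAYER_NAMES>) where PLAYER_NAMES is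
--              a comma-separated list of the players who have tied
--     """
--
--     max_tiebreaker = max([tiebreaker for tiebreaker in tiebreakers.values()])
--     winners = [
--         player
--         for player, tiebreaker in tiebreakers.items()
--         if tiebreaker == max_tiebreaker
--     ]
--     return winners[0] if len(winners) == 1 else f"TIE({','.join(sorted(winners))})"
-- ===== SOURCE B (Python) =====
-- def _outs_tb_straight(tiebreakers):
--     items = iter(tiebreakers.items())
--     best_player, best = next(items)
--     winners = [best_player]
--     for player, tb in items:
--         if tb > best:
--             best = tb
--             winners = [player]
--         elif tb == best:
--             winners.append(player)
--     return winners[0] if len(winners) == 1 else f"TIE({','.join(sorted(winners))})"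
-- ===== Notes on version B (the rewrite author's own statement) =====
-- stated objective: simpler
-- what changed: Replaces the max() pass plus a second filtering comprehension with a single pass over the items that maintains a running best value and the current winners list (reset on a strictly larger tiebreaker, append on a tie).
import Mathlib
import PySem

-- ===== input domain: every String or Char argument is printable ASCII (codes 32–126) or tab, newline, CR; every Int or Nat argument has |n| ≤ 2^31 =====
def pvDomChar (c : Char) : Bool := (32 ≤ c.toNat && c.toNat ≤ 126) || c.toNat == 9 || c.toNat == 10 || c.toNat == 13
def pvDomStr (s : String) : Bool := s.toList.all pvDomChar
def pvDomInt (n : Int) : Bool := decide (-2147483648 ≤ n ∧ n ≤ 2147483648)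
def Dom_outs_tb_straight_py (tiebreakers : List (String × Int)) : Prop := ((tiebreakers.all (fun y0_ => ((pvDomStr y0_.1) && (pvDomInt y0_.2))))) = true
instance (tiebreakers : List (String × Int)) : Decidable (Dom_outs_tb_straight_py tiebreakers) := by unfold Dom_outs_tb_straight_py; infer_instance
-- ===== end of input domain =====

-- B replaces A's max()+filter comprehensions with a single running-best pass; objective: simpler (same O(n) cost).


-- ===== PORT A =====
-- max([...]) raises ValueError on an empty dict; PySem.List.max? is none exactly there (excluded by Pre_).
def outs_tb_straight_py (tiebreakers : List (String × Int)) : String :=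
  match PySem.List.max? (tiebreakers.map Prod.snd) (fun v => v) with
  | none => ""
  | some maxTb =>
    let winners := (tiebreakers.filter (fun pv => pv.2 == maxTb)).map Prod.fst
    if winners.length == 1 then winners.headD ""
    else "TIE(" ++ PySem.Str.join "," (PySem.List.sorted winners (fun s => s)) ++ ")"

-- ===== PORT B =====
-- the for-loop over the remaining items, carrying (best, winners)
def pvAltLoop : Int → List String → List (String × Int) → Int × List String
  | best, winners, [] => (best, winners)
  | best, winners, (player, tb) :: rest =>
    if tb > best then pvAltLoop tb [player] rest
    else if tb == best then pvAltLoop best (winners ++ [player]) rest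
    else pvAltLoop best winners rest

-- B's next(items) raises StopIteration on an empty dict (excluded by Pre_).
def outs_tb_straight_py_alt (tiebreakers : List (String × Int)) : String :=
  match tiebreakers with
  | [] => ""
  | (p0, v0) :: rest =>
    let res := pvAltLoop v0 [p0] rest
    let winners := res.2
    if winners.length == 1 then winners.headD ""
    else "TIE(" ++ PySem.Str.join "," (PySem.List.sorted winners (fun s => s)) ++ ")"

-- ===== PRECONDITION & SPEC =====
-- A raises ValueError (max of an empty sequence) exactly when the dict is empty; B raises StopIteration there.
def Pre_outs_tb_straight_py (tiebreakers : List (String × Int)) : Prop := tiebreakers ≠ []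
instance (tiebreakers : List (String × Int)) : Decidable (Pre_outs_tb_straight_py tiebreakers) := by unfold Pre_outs_tb_straight_py; infer_instance
def pvWitness_outs_tb_straight_py : (List (String × Int)) := [("alice", 5), ("bob", 5)]

def Spec_outs_tb_straight_py (tiebreakers : List (String × Int)) (out : String) : Prop := out = outs_tb_straight_py_alt tiebreakers
instance (tiebreakers : List (String × Int)) (out : String) : Decidable (Spec_outs_tb_straight_py tiebreakers out) := by unfold Spec_outs_tb_straight_py; infer_instance

-- ===== CLAIM (what is proved, stated in full; the proofs are below) =====
def Claim_equal_outs_tb_straight_py : Prop := ∀ (tiebreakers : List (String × Int)), Dom_outs_tb_straight_py tiebreakers → Pre_outs_tb_straight_py tiebreakers → Spec_outs_tb_straight_py tiebreakers (outs_tb_straight_py tiebreakers)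

-- ===== LEMMAS AND PROOFS =====


-- the running max never decreases below its seed
theorem pvFoldlMaxLe (rest : List (String × Int)) (b' : Int) :
    b' ≤ rest.foldl (fun acc pv => max acc pv.2) b' := by
  induction rest generalizing b' with
  | nil => simp
  | cons h2 t2 ih2 => exact le_trans (le_max_left _ _) (ih2 _)

-- Invariant of B's loop: final best is the running max, final winners are the carried
-- prefix winners (discarded if a strictly larger value appears) plus the keys of the
-- suffix whose value equals the overall max.
theorem pvAltLoop_spec (l : List (String × Int)) (b : Int) (w : List String) :
    pvAltLoop b w l =
      (l.foldl (fun acc pv => max acc pv.2) b,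
       (if l.foldl (fun acc pv => max acc pv.2) b > b then [] else w) ++
         (l.filter (fun pv => pv.2 == l.foldl (fun acc pv => max acc pv.2) b)).map Prod.fst) := by
  induction l generalizing b w with
  | nil => simp [pvAltLoop]
  | cons hd tl ih =>
    obtain ⟨p, v⟩ := hd
    have hmax := pvFoldlMaxLe tl
    simp only [pvAltLoop, List.foldl_cons, List.filter_cons]
    by_cases h1 : v > b
    · rw [if_pos h1, ih]
      have hb : max b v = v := by omega
      simp only [hb]
      have hM := hmax v
      by_cases h2 : tl.foldl (fun acc pv => max acc pv.2) v > v
      · rw [if_pos h2, if_pos (by omega)]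
        have : (v == tl.foldl (fun acc pv => max acc pv.2) v) = false := by
          simp; omega
        simp [this]
      · rw [if_neg h2, if_pos (by omega)]
        have hv : tl.foldl (fun acc pv => max acc pv.2) v = v := by omega
        simp [hv]
    · rw [if_neg h1]
      have hb : max b v = b := by omega
      simp only [hb]
      have hM := hmax b
      by_cases h2 : v == b
      · rw [if_pos h2]
        rw [ih]
        by_cases h3 : tl.foldl (fun acc pv => max acc pv.2) b > b
        · simp only [if_pos h3]
          have : (v == tl.foldl (fun acc pv => max acc pv.2) b) = false := by
            simp at h2 ⊢; omega
          simp [this]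
        · simp only [if_neg h3]
          have hv : tl.foldl (fun acc pv => max acc pv.2) b = b := by omega
          rw [hv, if_pos h2]
          simp
      · rw [if_neg h2, ih]
        by_cases h3 : tl.foldl (fun acc pv => max acc pv.2) b > b
        · simp only [if_pos h3]
          have : (v == tl.foldl (fun acc pv => max acc pv.2) b) = false := by
            simp at h2 ⊢; omega
          simp [this]
        · simp only [if_neg h3]
          have hv : tl.foldl (fun acc pv => max acc pv.2) b = b := by omega
          rw [hv, if_neg h2]

-- ===== VERDICT (by name: the statement is the Claim_ definition above) =====
theorem outs_tb_straight_py_spec : Claim_equal_outs_tb_straight_py := by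
  intro tiebreakers _ hpre
  unfold Spec_outs_tb_straight_py
  match tiebreakers with
  | [] => exact absurd rfl hpre
  | (p0, v0) :: rest =>
    have hfold : (rest.map Prod.snd).foldl max v0 =
        rest.foldl (fun acc pv => max acc pv.2) v0 := by
      rw [List.foldl_map]
    have hM := pvFoldlMaxLe rest
    have hw : (((p0, v0) :: rest).filter
          (fun pv => pv.2 == (rest.map Prod.snd).foldl max v0)).map Prod.fst
        = (pvAltLoop v0 [p0] rest).2 := by
      rw [pvAltLoop_spec, hfold]
      set M := rest.foldl (fun acc pv => max acc pv.2) v0 with hMdef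
      rw [List.filter_cons]
      by_cases h : M > v0
      · have hne : ((p0, v0).2 == M) = false := by simp; omega
        simp [hne, h]
      · have hv : M = v0 := by have := hM v0; omega
        simp [hv, h]
    simp only [outs_tb_straight_py, outs_tb_straight_py_alt, List.map_cons,
      PySem.List.max?_id_cons, hw]
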